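-- pv_equiv track=rewrite | github.com/toku463ne/cld_trade_advisor | src/viz/app.py | _columns_from_params
-- ===== SOURCE A (Python) =====
-- _PARAM_DISPLAY: dict[str, str] = {
--     "sma_period":  "SMA",
--     "sigma_mult":  "σ",
--     "n_days":      "N",
--     "m_days":      "M",
--     "tp":          "TP%",
--     "sl":          "SL%",
--     "take_profit": "TP%",
--     "stop_loss":   "SL%",
-- }
--
-- _SKIP_PARAMS: frozenset[str] = frozenset({"units"})
--
-- _PARAM_ORDER: list[str] = [
--     "sma_period", "sigma_mult", "n_days", "m_days",
--     "tp", "take_profit", "sl", "stop_loss",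
-- ]
--
-- def _columns_from_params(params_json: dict) -> list[dict]:
--     keys = set(params_json.keys()) - _SKIP_PARAMS
--     ordered   = [k for k in _PARAM_ORDER if k in keys]
--     remaining = sorted(keys - set(ordered))
--     cols = [{"name": "#", "id": "rank"}]
--     for k in ordered + remaining:
--         cols.append({"name": _PARAM_DISPLAY.get(k, k), "id": k})
--     cols.append({"name": "Score", "id": "score"})
--     return cols
-- ===== SOURCE B (Python) =====
-- _PARAM_DISPLAY: dict[str, str] = {
--     "sma_period":  "SMA",
--     "sigma_mult":  "σ",
--     "n_days":      "N",
--     "m_days":      "M",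
--     "tp":          "TP%",
--     "sl":          "SL%",
--     "take_profit": "TP%",
--     "stop_loss":   "SL%",
-- }
--
-- _SKIP_PARAMS: frozenset[str] = frozenset({"units"})
--
-- _PARAM_ORDER: list[str] = [
--     "sma_period", "sigma_mult", "n_days", "m_days",
--     "tp", "take_profit", "sl", "stop_loss",
-- ]
--
-- def _columns_from_params(params_json: dict) -> list[dict]:
--     idx = {k: i for i, k in enumerate(_PARAM_ORDER)}
--     keys = set(params_json) - _SKIP_PARAMS
--     ordered_keys = sorted(keys, key=lambda k: (idx.get(k, len(_PARAM_ORDER)), k))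
--     return ([{"name": "#", "id": "rank"}]
--             + [{"name": _PARAM_DISPLAY.get(k, k), "id": k} for k in ordered_keys]
--             + [{"name": "Score", "id": "score"}])
-- ===== Notes on version B (the rewrite author's own statement) =====
-- stated objective: simpler
-- what changed: Replaces A's two-phase ordering (filter _PARAM_ORDER by membership, then sort the leftover set) and imperative append loop with a single sort of all keys under a (priority-index, name) tuple key plus list comprehensions.
import Mathlib
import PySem

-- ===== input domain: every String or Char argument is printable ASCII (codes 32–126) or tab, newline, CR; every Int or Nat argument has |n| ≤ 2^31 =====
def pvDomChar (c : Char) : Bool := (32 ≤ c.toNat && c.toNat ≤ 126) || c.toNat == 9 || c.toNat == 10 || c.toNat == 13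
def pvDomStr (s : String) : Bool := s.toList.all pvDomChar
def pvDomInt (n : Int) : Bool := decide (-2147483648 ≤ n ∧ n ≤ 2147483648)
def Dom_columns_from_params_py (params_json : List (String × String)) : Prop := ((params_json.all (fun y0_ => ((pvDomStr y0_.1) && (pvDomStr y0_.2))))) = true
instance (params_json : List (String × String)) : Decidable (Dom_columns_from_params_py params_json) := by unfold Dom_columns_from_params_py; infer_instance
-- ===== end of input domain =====

-- B replaces A's two-phase ordering (filter _PARAM_ORDER by membership, then sort the
-- leftover set) and its imperative append loop by ONE sort of all keys under a
-- (priority-index, name) key plus list concatenation; objective: simpler.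

-- module-level constants shared by both Python versions
def pvParamDisplay : PySem.Dict String String :=
  PySem.Dict.mk [("sma_period", "SMA"), ("sigma_mult", "σ"), ("n_days", "N"), ("m_days", "M"),
   ("tp", "TP%"), ("sl", "SL%"), ("take_profit", "TP%"), ("stop_loss", "SL%")]

def pvSkipParams : List String := ["units"]

def pvParamOrder : List String :=
  ["sma_period", "sigma_mult", "n_days", "m_days", "tp", "take_profit", "sl", "stop_loss"]

-- ===== PORT A =====
def columns_from_params_py (params_json : List (String × String)) : List (List (String × String)) :=
  let keys := PySem.Set.diff (PySem.Set.ofList (params_json.map Prod.fst)) pvSkipParams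
  let ordered := pvParamOrder.filter (fun k => PySem.Set.contains keys k)
  let remaining := PySem.List.sorted (PySem.Set.diff keys (PySem.Set.ofList ordered)) (fun x => x) false
  let cols := (ordered ++ remaining).foldl
    (fun cols k => cols ++ [[("name", PySem.Dict.getD pvParamDisplay k k), ("id", k)]])
    [[("name", "#"), ("id", "rank")]]
  cols ++ [[("name", "Score"), ("id", "score")]]

-- ===== PORT B =====
def columns_from_params_py_alt (params_json : List (String × String)) : List (List (String × String)) :=
  let idx : PySem.Dict String Int :=
    (PySem.List.enumerate pvParamOrder).foldl (fun d p => PySem.Dict.insert d p.2 p.1) PySem.Dict.empty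
  let keys := PySem.Set.diff (PySem.Set.ofList (params_json.map Prod.fst)) pvSkipParams
  let ordered_keys := PySem.List.sorted2 keys
    (fun k => PySem.Dict.getD idx k (pvParamOrder.length : Int)) (fun k => k) false
  [[("name", "#"), ("id", "rank")]]
    ++ ordered_keys.map (fun k => [("name", PySem.Dict.getD pvParamDisplay k k), ("id", k)])
    ++ [[("name", "Score"), ("id", "score")]]

-- ===== PRECONDITION & SPEC =====
def Spec_columns_from_params_py (params_json : List (String × String)) (out : List (List (String × String))) : Prop := out = columns_from_params_py_alt params_json
instance (params_json : List (String × String)) (out : List (List (String × String))) : Decidable (Spec_columns_from_params_py params_json out) := by unfold Spec_columns_from_params_py; infer_instance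

-- ===== CLAIM (what is proved, stated in full; the proofs are below) =====
def Claim_equal_columns_from_params_py : Prop := ∀ (params_json : List (String × String)), Dom_columns_from_params_py params_json → Spec_columns_from_params_py params_json (columns_from_params_py params_json)

-- ===== LEMMAS AND PROOFS =====

-- B's priority function, named for the proofs
def pvPri (k : String) : Int :=
  PySem.Dict.getD
    ((PySem.List.enumerate pvParamOrder).foldl (fun d p => PySem.Dict.insert d p.2 p.1) PySem.Dict.empty) k 8

-- sorted with a two-component key is sorted under the lexicographic key
theorem sorted2_eq_sorted_lex {α : Type} {κ₁ κ₂ : Type} [LinearOrder κ₁] [LinearOrder κ₂]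
    (xs : List α) (k1 : α → κ₁) (k2 : α → κ₂) :
    PySem.List.sorted2 xs k1 k2 false
      = PySem.List.sorted xs (fun x => toLex (k1 x, k2 x)) false := by
  have h : (fun a b => decide (k1 a < k1 b) || (!decide (k1 b < k1 a) && decide (k2 a < k2 b)))
       = (fun a b : α => decide ((toLex (k1 a, k2 a)) < toLex (k1 b, k2 b))) := by
    funext a b
    by_cases h1 : k1 a < k1 b
    · simp [h1, Prod.Lex.lt_iff]
    · by_cases h2 : k1 b < k1 a
      · simp [h1, h2, Prod.Lex.lt_iff, ne_of_gt h2]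
      · have he : k1 a = k1 b := le_antisymm (not_lt.mp h2) (not_lt.mp h1)
        simp [he, Prod.Lex.lt_iff]
  simp only [PySem.List.sorted2, PySem.List.sorted, h]
  simp

theorem pri_lt_of_mem (k : String) (h : k ∈ pvParamOrder) : pvPri k < 8 := by
  fin_cases h <;> decide

theorem pri_eq_of_not_mem (k : String) (h : k ∉ pvParamOrder) : pvPri k = 8 := by
  simp [pvParamOrder] at h
  obtain ⟨h1,h2,h3,h4,h5,h6,h7,h8⟩ := h
  simp [pvPri, pvParamOrder, PySem.List.enumerate, PySem.Dict.insert, PySem.Dict.empty,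
    PySem.Dict.getD, PySem.Dict.get?, List.find?,
    beq_eq_false_iff_ne.mpr (Ne.symm h1), beq_eq_false_iff_ne.mpr (Ne.symm h2),
    beq_eq_false_iff_ne.mpr (Ne.symm h3), beq_eq_false_iff_ne.mpr (Ne.symm h4),
    beq_eq_false_iff_ne.mpr (Ne.symm h5), beq_eq_false_iff_ne.mpr (Ne.symm h6),
    beq_eq_false_iff_ne.mpr (Ne.symm h7), beq_eq_false_iff_ne.mpr (Ne.symm h8)]

theorem order_pairwise :
    pvParamOrder.Pairwise (fun a b => (toLex (pvPri a, a) : Lex (Int × String)) < toLex (pvPri b, b)) := by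
  decide

-- A's (ordered ++ remaining) is exactly B's single sort of the key set
theorem ordering_eq (keys : List String) (hnd : keys.Nodup) :
    PySem.List.sorted2 keys (fun k => pvPri k) (fun k => k) false
      = pvParamOrder.filter (fun k => PySem.Set.contains keys k)
        ++ PySem.List.sorted
             (PySem.Set.diff keys
               (PySem.Set.ofList (pvParamOrder.filter (fun k => PySem.Set.contains keys k))))
             (fun x => x) false := by
  set ordered := pvParamOrder.filter (fun k => PySem.Set.contains keys k) with hordered
  set diff := PySem.Set.diff keys (PySem.Set.ofList ordered) with hdiff
  set remaining := PySem.List.sorted diff (fun x => x) false with hremaining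
  have hmo : ∀ x, x ∈ ordered ↔ x ∈ pvParamOrder ∧ x ∈ keys := by
    intro x
    simp [hordered, List.mem_filter, PySem.Set.contains]
  have hmd : ∀ x, x ∈ diff ↔ x ∈ keys ∧ x ∉ pvParamOrder := by
    intro x
    simp only [hdiff, PySem.Set.diff, List.mem_filter, Bool.not_eq_eq_eq_not, Bool.not_true,
      PySem.Set.contains]
    constructor
    · rintro ⟨hk, hnc⟩
      refine ⟨hk, fun ho => ?_⟩
      have : x ∈ PySem.Set.ofList ordered := (PySem.Set.mem_ofList _ _).2 ((hmo x).2 ⟨ho, hk⟩)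
      simp [this] at hnc
    · rintro ⟨hk, hno⟩
      refine ⟨hk, ?_⟩
      have : x ∉ PySem.Set.ofList ordered := fun hx =>
        hno ((hmo x).1 ((PySem.Set.mem_ofList _ _).1 hx)).1
      simpa using this
  have hnd_ord : ordered.Nodup := List.Nodup.filter _ (by decide)
  have hnd_diff : diff.Nodup := List.Nodup.filter _ hnd
  have hnd_rem : remaining.Nodup :=
    ((PySem.List.sorted_perm diff (fun x : String => x) false).symm).nodup hnd_diff
  have hmr : ∀ x, x ∈ remaining ↔ x ∈ keys ∧ x ∉ pvParamOrder := by
    intro x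
    rw [hremaining, PySem.List.mem_sorted]
    exact hmd x
  have hperm : (ordered ++ remaining).Perm keys := by
    have h1 : (ordered ++ remaining).Perm (ordered ++ diff) :=
      List.Perm.append (List.Perm.refl _) (PySem.List.sorted_perm diff _ false)
    have hnd_app : (ordered ++ diff).Nodup := by
      rw [List.nodup_append]
      refine ⟨hnd_ord, hnd_diff, fun a ha b hb hab => ?_⟩
      subst hab
      exact ((hmd a).1 hb).2 ((hmo a).1 ha).1
    have h2 : (ordered ++ diff).Perm keys := by
      rw [List.perm_ext_iff_of_nodup hnd_app hnd]
      intro a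
      rw [List.mem_append, hmo a, hmd a]
      by_cases h : a ∈ pvParamOrder <;> by_cases hk : a ∈ keys <;> simp [h, hk]
    exact h1.trans h2
  have hpair : (ordered ++ remaining).Pairwise
      (fun a b => (toLex (pvPri a, a) : Lex (Int × String)) < toLex (pvPri b, b)) := by
    rw [List.pairwise_append]
    refine ⟨List.Pairwise.sublist List.filter_sublist order_pairwise, ?_, ?_⟩
    · have hlt : remaining.Pairwise (fun a b => a < b) := by
        have hle := PySem.List.sorted_pairwise diff (fun x : String => x)
        rw [← hremaining] at hle
        exact (hle.and hnd_rem).imp (fun h => lt_of_le_of_ne h.1 h.2)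
      refine hlt.imp_of_mem (fun {a b} ha hb hab => ?_)
      rw [Prod.Lex.lt_iff]
      right
      refine ⟨?_, hab⟩
      simp [pri_eq_of_not_mem a ((hmr a).1 ha).2, pri_eq_of_not_mem b ((hmr b).1 hb).2]
    · intro a ha b hb
      rw [Prod.Lex.lt_iff]
      left
      have h1 : pvPri a < 8 := pri_lt_of_mem a ((hmo a).1 ha).1
      have h2 : pvPri b = 8 := pri_eq_of_not_mem b ((hmr b).1 hb).2
      simpa [h2] using h1
  calc PySem.List.sorted2 keys (fun k => pvPri k) (fun k => k) false
      = PySem.List.sorted keys (fun k => toLex (pvPri k, k)) false :=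
        sorted2_eq_sorted_lex keys _ _
    _ = ordered ++ remaining :=
        PySem.List.sorted_eq_of_perm_of_pairwise_lt _ _ _ hperm hpair

-- A's append loop is a map
theorem foldl_append_cols (l : List String) (acc : List (List (String × String))) :
    l.foldl (fun cols k => cols ++ [[("name", PySem.Dict.getD pvParamDisplay k k), ("id", k)]]) acc
      = acc ++ l.map (fun k => [("name", PySem.Dict.getD pvParamDisplay k k), ("id", k)]) := by
  induction l generalizing acc with
  | nil => simp
  | cons x t ih => simp [List.foldl, ih]

-- ===== VERDICT (by name: the statement is the Claim_ definition above) =====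
theorem columns_from_params_py_spec : Claim_equal_columns_from_params_py := by
  intro params_json _hdom
  unfold Spec_columns_from_params_py columns_from_params_py columns_from_params_py_alt
  set keys := PySem.Set.diff (PySem.Set.ofList (params_json.map Prod.fst)) pvSkipParams with hkeys
  have hnd : keys.Nodup :=
    List.Nodup.filter _ (PySem.Set.nodup_ofList (params_json.map Prod.fst))
  have hlen : ((pvParamOrder.length : Int)) = 8 := by decide
  simp only [foldl_append_cols, hlen]
  rw [show (fun k => PySem.Dict.getD
        ((PySem.List.enumerate pvParamOrder).foldl
          (fun d p => PySem.Dict.insert d p.2 p.1) PySem.Dict.empty) k (8 : Int))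
      = fun k => pvPri k from rfl]
  rw [ordering_eq keys hnd]
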